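-- pv_equiv track=rewrite | github.com/aliarabat/OpenStack | scripts/openstack-paths-generation.py | combine_co_changes_number
-- ===== SOURCE A (Python) =====
-- def combine_co_changes_number(main_array, second_array):
--     '''Combine lines that mention at least 1 common number
--     '''
--     result = main_array.copy()
--
--     for arr_item in second_array:
--
--         added = False
--         for j in range(len(main_array)):
--             row_dep = main_array[j]
--             check_any = any(item in row_dep for item in arr_item)
--
--             if check_any:
--                 result[j] = list(dict.fromkeys(result[j] + arr_item))
--                 added = True
--
--         if not added:
--             result.append(arr_item)
--     return result
-- ===== SOURCE B (Python) =====
-- def combine_co_changes_number(main_array, second_array):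
--     '''Combine lines that mention at least 1 common number
--     '''
--     index = {}
--     for j, row in enumerate(main_array):
--         for num in row:
--             index.setdefault(num, []).append(j)
--     result = main_array.copy()
--     extras = []
--     for arr_item in second_array:
--         matched = sorted({j for num in arr_item for j in index.get(num, [])})
--         if matched:
--             for j in matched:
--                 result[j] = list(dict.fromkeys(result[j] + arr_item))
--         else:
--             extras.append(arr_item)
--     return result + extras
-- ===== Notes on version B (the rewrite author's own statement) =====
-- stated objective: alternative
-- what changed: B builds an inverted index number->main-row-indices once and, for each second row, updates only the rows found by dict lookups (keeping unmatched extras in a separate tail list), instead of A's membership scan of every main row for every second row.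
import Mathlib
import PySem

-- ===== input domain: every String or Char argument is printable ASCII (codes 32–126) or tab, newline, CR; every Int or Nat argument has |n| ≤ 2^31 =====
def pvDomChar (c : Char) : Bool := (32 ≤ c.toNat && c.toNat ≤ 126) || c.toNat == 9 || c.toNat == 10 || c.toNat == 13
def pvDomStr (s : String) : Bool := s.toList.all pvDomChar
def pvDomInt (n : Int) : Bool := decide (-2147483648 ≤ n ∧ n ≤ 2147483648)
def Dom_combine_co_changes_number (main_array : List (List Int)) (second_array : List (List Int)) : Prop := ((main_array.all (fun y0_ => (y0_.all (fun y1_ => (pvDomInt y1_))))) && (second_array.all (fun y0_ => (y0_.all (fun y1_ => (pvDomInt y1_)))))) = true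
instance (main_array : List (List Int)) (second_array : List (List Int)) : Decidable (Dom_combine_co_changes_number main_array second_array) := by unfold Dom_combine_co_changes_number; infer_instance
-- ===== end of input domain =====

-- B replaces A's scan of every main row per second row by an inverted index number→row-indices,
-- updating only the rows the lookups find (objective: alternative algorithm; exact same output).

-- ===== PORT A =====
def combine_co_changes_number (main_array : List (List Int)) (second_array : List (List Int)) : List (List Int) :=
  second_array.foldl (fun result arr_item =>
    let st := (PySem.List.pyRange 0 (main_array.length : Int) 1).foldl
      (fun (st : List (List Int) × Bool) j =>
        let row_dep := PySem.List.pyGetD main_array j []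
        let check_any := arr_item.any (fun item => decide (item ∈ row_dep))
        if check_any then
          (PySem.List.pySetD st.1 j (PySem.List.dedup (PySem.List.pyGetD st.1 j [] ++ arr_item)), true)
        else st)
      (result, false)
    if st.2 then st.1 else st.1 ++ [arr_item])
    main_array

-- ===== PORT B =====
-- index.setdefault(num, []).append(j)  ==  index[num] = index.get(num, []) + [j]
def pvBuildIndex (main_array : List (List Int)) : PySem.Dict Int (List Int) :=
  (PySem.List.enumerate main_array 0).foldl
    (fun d p => p.2.foldl
      (fun d num => PySem.Dict.insert d num (PySem.Dict.getD d num [] ++ [p.1])) d)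
    PySem.Dict.empty

def combine_co_changes_number_alt (main_array : List (List Int)) (second_array : List (List Int)) : List (List Int) :=
  let index := pvBuildIndex main_array
  let st := second_array.foldl
    (fun (st : List (List Int) × List (List Int)) arr_item =>
      let matched := PySem.List.sorted
        (PySem.Set.ofList (arr_item.flatMap (fun num => PySem.Dict.getD index num [])))
        (fun x => x) false
      if matched = [] then (st.1, st.2 ++ [arr_item])
      else
        (matched.foldl
          (fun res j => PySem.List.pySetD res j (PySem.List.dedup (PySem.List.pyGetD res j [] ++ arr_item)))
          st.1, st.2))
    (main_array, ([] : List (List Int)))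
  st.1 ++ st.2

-- ===== PRECONDITION & SPEC =====
def Spec_combine_co_changes_number (main_array : List (List Int)) (second_array : List (List Int)) (out : List (List Int)) : Prop := out = combine_co_changes_number_alt main_array second_array
instance (main_array : List (List Int)) (second_array : List (List Int)) (out : List (List Int)) : Decidable (Spec_combine_co_changes_number main_array second_array out) := by unfold Spec_combine_co_changes_number; infer_instance

-- ===== CLAIM (what is proved, stated in full; the proofs are below) =====
def Claim_equal_combine_co_changes_number : Prop := ∀ (main_array : List (List Int)) (second_array : List (List Int)), Dom_combine_co_changes_number main_array second_array → Spec_combine_co_changes_number main_array second_array (combine_co_changes_number main_array second_array)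

-- ===== LEMMAS AND PROOFS =====

-- A's membership test for second row `arr` against main row j
def pvCheck (main_array : List (List Int)) (arr : List Int) (j : Int) : Bool :=
  arr.any (fun item => decide (item ∈ PySem.List.pyGetD main_array j []))

-- the shared row-update
def pvUpd (arr : List Int) (res : List (List Int)) (j : Int) : List (List Int) :=
  PySem.List.pySetD res j (PySem.List.dedup (PySem.List.pyGetD res j [] ++ arr))

-- L1: inner dict-building fold, membership characterisation
theorem pv_inner_mem (row : List Int) (d : PySem.Dict Int (List Int)) (j i num : Int) :
    i ∈ PySem.Dict.getD
        (row.foldl (fun d num => PySem.Dict.insert d num (PySem.Dict.getD d num [] ++ [j])) d)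
        num []
      ↔ i ∈ PySem.Dict.getD d num [] ∨ (i = j ∧ num ∈ row) := by
  induction row generalizing d with
  | nil => simp
  | cons a t ih =>
    simp only [List.foldl_cons, ih, PySem.Dict.getD_insert, List.mem_cons]
    by_cases h : num = a
    · subst h; simp
      tauto
    · simp [h]

-- L2: fold over the enumerated pairs
theorem pv_pairs_mem (pairs : List (Int × List Int)) (d : PySem.Dict Int (List Int)) (i num : Int) :
    i ∈ PySem.Dict.getD
        (pairs.foldl (fun d p => p.2.foldl
          (fun d num => PySem.Dict.insert d num (PySem.Dict.getD d num [] ++ [p.1])) d) d)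
        num []
      ↔ i ∈ PySem.Dict.getD d num [] ∨ ∃ p ∈ pairs, i = p.1 ∧ num ∈ p.2 := by
  induction pairs generalizing d with
  | nil => simp
  | cons p t ih =>
    simp only [List.foldl_cons, ih, pv_inner_mem, List.mem_cons]
    constructor
    · rintro ((h | h) | ⟨q, hq, h⟩)
      · exact Or.inl h
      · exact Or.inr ⟨p, Or.inl rfl, h⟩
      · exact Or.inr ⟨q, Or.inr hq, h⟩
    · rintro (h | ⟨q, (rfl | hq), h⟩)
      · exact Or.inl (Or.inl h)
      · exact Or.inl (Or.inr h)
      · exact Or.inr ⟨q, hq, h⟩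

-- L3: the inverted index is exact
theorem pv_index_mem (main_array : List (List Int)) (i num : Int) :
    i ∈ PySem.Dict.getD (pvBuildIndex main_array) num []
      ↔ i ∈ PySem.List.pyRange 0 (main_array.length : Int) 1 ∧ num ∈ PySem.List.pyGetD main_array i [] := by
  unfold pvBuildIndex
  rw [PySem.List.enumerate_eq_map_pyRange main_array ([] : List Int)]
  rw [pv_pairs_mem]
  simp only [PySem.Dict.getD_empty, List.not_mem_nil, false_or, List.mem_map]
  constructor
  · rintro ⟨p, ⟨jj, hjj, rfl⟩, rfl, h⟩
    exact ⟨hjj, h⟩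
  · rintro ⟨hi, h⟩
    exact ⟨(i, PySem.List.pyGetD main_array i []), ⟨i, hi, rfl⟩, rfl, h⟩

-- L4: B's matched list is exactly A's filtered index range
theorem pv_matched_eq (main_array : List (List Int)) (arr : List Int) :
    PySem.List.sorted
        (PySem.Set.ofList (arr.flatMap (fun num => PySem.Dict.getD (pvBuildIndex main_array) num [])))
        (fun x => x) false
      = (PySem.List.pyRange 0 (main_array.length : Int) 1).filter (pvCheck main_array arr) := by
  apply PySem.List.sorted_eq_of_perm_of_pairwise_lt
  · rw [List.perm_ext_iff_of_nodup
      (List.Nodup.filter _ (PySem.List.nodup_pyRange_one 0 (main_array.length : Int)))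
      (PySem.Set.nodup_ofList _)]
    intro x
    simp only [List.mem_filter, PySem.Set.mem_ofList, List.mem_flatMap, pv_index_mem,
      pvCheck, List.any_eq_true, decide_eq_true_eq]
    tauto
  · exact List.Pairwise.filter _ (PySem.List.pairwise_lt_pyRange_one 0 (main_array.length : Int))

-- L5: A's inner (result, added) fold, separated
theorem pv_A_inner (main_array : List (List Int)) (arr : List Int) (l : List Int)
    (res : List (List Int)) (b : Bool) :
    l.foldl (fun (st : List (List Int) × Bool) j =>
        if pvCheck main_array arr j then (pvUpd arr st.1 j, true) else st) (res, b)
      = ((l.filter (pvCheck main_array arr)).foldl (pvUpd arr) res,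
         b || l.any (pvCheck main_array arr)) := by
  induction l generalizing res b with
  | nil => simp
  | cons j t ih =>
    by_cases h : pvCheck main_array arr j
    · simp [h, ih]
    · simp [h, ih]

-- L6: updating indices below r.length ignores an appended tail and preserves length
theorem pv_fold_append (arr : List Int) (js : List Int) (r e : List (List Int))
    (h : ∀ j ∈ js, 0 ≤ j ∧ j < (r.length : Int)) :
    js.foldl (pvUpd arr) (r ++ e) = js.foldl (pvUpd arr) r ++ e
      ∧ (js.foldl (pvUpd arr) r).length = r.length := by
  induction js generalizing r with
  | nil => simp
  | cons j t ih =>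
    obtain ⟨⟨hj0, hjr⟩, hrest⟩ := List.forall_mem_cons.mp h
    have hup : pvUpd arr (r ++ e) j = pvUpd arr r j ++ e := by
      unfold pvUpd
      rw [PySem.List.pySetD_of_nonneg _ _ hj0, PySem.List.pySetD_of_nonneg _ _ hj0]
      have hlt : j.toNat < r.length := by omega
      rw [List.set_append_left _ _ hlt]
      congr 2
      rw [PySem.List.pyGetD_of_nonneg _ _ hj0, PySem.List.pyGetD_of_nonneg _ _ hj0]
      rw [List.getD_append _ _ _ _ hlt]
    have hlen : (pvUpd arr r j).length = r.length := by
      unfold pvUpd; rw [PySem.List.pySetD_of_nonneg _ _ hj0]; simp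
    have ih' := ih (pvUpd arr r j) (by rw [hlen]; exact hrest)
    refine ⟨?_, ?_⟩
    · rw [List.foldl_cons, List.foldl_cons, hup]; exact ih'.1
    · rw [List.foldl_cons, ih'.2, hlen]

-- canonical per-second-row steps of the two programs
def pvStepA (main_array : List (List Int)) (result : List (List Int)) (arr : List Int) : List (List Int) :=
  let p := (PySem.List.pyRange 0 (main_array.length : Int) 1).filter (pvCheck main_array arr)
  if p = [] then result ++ [arr] else p.foldl (pvUpd arr) result

def pvStepB (main_array : List (List Int)) (st : List (List Int) × List (List Int)) (arr : List Int) :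
    List (List Int) × List (List Int) :=
  let p := (PySem.List.pyRange 0 (main_array.length : Int) 1).filter (pvCheck main_array arr)
  if p = [] then (st.1, st.2 ++ [arr]) else (p.foldl (pvUpd arr) st.1, st.2)

-- A's port computes foldl of pvStepA
theorem pv_A_eq (main_array second_array : List (List Int)) :
    combine_co_changes_number main_array second_array
      = second_array.foldl (pvStepA main_array) main_array := by
  unfold combine_co_changes_number
  congr 1
  funext result arr
  show (let st := (PySem.List.pyRange 0 (main_array.length : Int) 1).foldl
          (fun (st : List (List Int) × Bool) j =>
            if pvCheck main_array arr j then (pvUpd arr st.1 j, true) else st) (result, false)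
        if st.2 then st.1 else st.1 ++ [arr]) = pvStepA main_array result arr
  rw [pv_A_inner]
  unfold pvStepA
  by_cases h : ((PySem.List.pyRange 0 (main_array.length : Int) 1).filter (pvCheck main_array arr)) = []
  · have hany : (PySem.List.pyRange 0 (main_array.length : Int) 1).any (pvCheck main_array arr) = false := by
      simp only [List.any_eq_false]
      intro j hj
      simpa using List.filter_eq_nil_iff.mp h j hj
    simp [h, hany]
  · have hany : (PySem.List.pyRange 0 (main_array.length : Int) 1).any (pvCheck main_array arr) = true := by
      rcases List.ne_nil_iff_exists_cons.mp h with ⟨j, t, hjt⟩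
      have hj : j ∈ (PySem.List.pyRange 0 (main_array.length : Int) 1).filter (pvCheck main_array arr) := by
        rw [hjt]; exact List.mem_cons_self
      rw [List.mem_filter] at hj
      exact List.any_eq_true.mpr ⟨j, hj.1, hj.2⟩
    simp [h, hany]

-- B's port computes foldl of pvStepB
theorem pv_B_eq (main_array second_array : List (List Int)) :
    combine_co_changes_number_alt main_array second_array
      = (second_array.foldl (pvStepB main_array) (main_array, [])).1
        ++ (second_array.foldl (pvStepB main_array) (main_array, [])).2 := by
  unfold combine_co_changes_number_alt
  simp only [pv_matched_eq]
  rfl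

-- the outer induction: A's single growing list is B's (rows, extras) pair
theorem pv_outer (main_array : List (List Int)) (second_array : List (List Int)) :
    ∀ (r e : List (List Int)), r.length = main_array.length →
      second_array.foldl (pvStepA main_array) (r ++ e)
          = (second_array.foldl (pvStepB main_array) (r, e)).1
            ++ (second_array.foldl (pvStepB main_array) (r, e)).2
        ∧ (second_array.foldl (pvStepB main_array) (r, e)).1.length = main_array.length := by
  induction second_array with
  | nil => intro r e h; exact ⟨rfl, h⟩
  | cons arr t ih =>
    intro r e h
    by_cases hp : ((PySem.List.pyRange 0 (main_array.length : Int) 1).filter (pvCheck main_array arr)) = []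
    · simp only [List.foldl_cons, pvStepA, pvStepB, hp, if_pos]
      have := ih r (e ++ [arr]) h
      rw [← List.append_assoc] at this
      exact this
    · have hmem : ∀ j ∈ (PySem.List.pyRange 0 (main_array.length : Int) 1).filter (pvCheck main_array arr),
          0 ≤ j ∧ j < (r.length : Int) := by
        intro j hj
        have := (List.mem_filter.mp hj).1
        rw [PySem.List.mem_pyRange_one] at this
        omega
      have hfa := pv_fold_append arr _ r e hmem
      simp only [List.foldl_cons, pvStepA, pvStepB, hp, hfa.1]
      exact ih _ e (by rw [hfa.2]; exact h)

-- ===== VERDICT (by name: the statement is the Claim_ definition above) =====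
theorem combine_co_changes_number_spec : Claim_equal_combine_co_changes_number := by
  intro main_array second_array _
  unfold Spec_combine_co_changes_number
  rw [pv_A_eq, pv_B_eq]
  have := pv_outer main_array second_array main_array [] rfl
  rw [List.append_nil] at this
  exact this.1
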